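-- pv_equiv track=rewrite | github.com/yahall0/Atlas_V2 | backend/app/ingestion/chargesheet_parser.py | _looks_like_header
-- ===== SOURCE A (Python) =====
-- _STOP_HEADERS = [
--     "accused",
--     "charge",
--     "charges",
--     "sections",
--     "evidence",
--     "documents",
--     "witness",
--     "witnesses",
--     "verification",
--     "prayer",
--     "io certification",
--     "investigation",
--     "complainant",
--     "brief facts",
--     "facts of the case",
--     "gist of the case",
--     "synopsis",
--     "conclusion of investigation",
--     "conclusion",
-- ]
--
-- def _looks_like_header(line: str) -> bool:
--     lower = line.lower().strip()
--     if not lower: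
--         return False
--     if len(lower) > 70:
--         return False
--     return any(
--         lower.startswith(header)
--         or lower == header
--         or lower.startswith(f"{header}:")
--         for header in _STOP_HEADERS
--     )
-- ===== SOURCE B (Python) =====
-- _STOP_HEADERS = [
--     "accused",
--     "charge",
--     "charges",
--     "sections",
--     "evidence",
--     "documents",
--     "witness",
--     "witnesses",
--     "verification",
--     "prayer",
--     "io certification",
--     "investigation",
--     "complainant",
--     "brief facts",
--     "facts of the case",
--     "gist of the case",
--     "synopsis",
--     "conclusion of investigation",
--     "conclusion",
-- ]
--
-- _HEADER_SET = frozenset(_STOP_HEADERS)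
-- _MAX_HEADER_LEN = max(len(h) for h in _STOP_HEADERS)
--
--
-- def _looks_like_header(line: str) -> bool:
--     lower = line.lower().strip()
--     if not lower or len(lower) > 70:
--         return False
--     for i in range(1, min(len(lower), _MAX_HEADER_LEN) + 1):
--         if lower[:i] in _HEADER_SET:
--             return True
--     return False
-- ===== Notes on version B (the rewrite author's own statement) =====
-- stated objective: alternative
-- what changed: Instead of scanning the 19-header list with three startswith/equality tests per header, B builds a frozenset of headers once and tests each prefix of the cleaned line (lengths 1..min(len,27)) for membership, exploiting that all three original tests reduce to startswith.
import Mathlib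
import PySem

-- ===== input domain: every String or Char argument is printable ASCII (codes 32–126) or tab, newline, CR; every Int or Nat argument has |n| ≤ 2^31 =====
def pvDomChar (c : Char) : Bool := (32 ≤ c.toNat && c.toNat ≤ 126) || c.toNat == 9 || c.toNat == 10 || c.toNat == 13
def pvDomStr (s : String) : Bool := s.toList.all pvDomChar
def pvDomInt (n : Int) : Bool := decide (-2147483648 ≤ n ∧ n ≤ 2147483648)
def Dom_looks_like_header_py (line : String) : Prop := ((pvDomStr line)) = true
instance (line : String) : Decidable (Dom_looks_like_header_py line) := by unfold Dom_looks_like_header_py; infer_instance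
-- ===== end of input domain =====

-- B replaces the per-header startswith scan by membership tests of the line's prefixes
-- (lengths 1..min(len,27)) in a set of headers: an alternative traversal, same cost class.


-- ===== PORT A =====
def STOP_HEADERS : List String :=
  ["accused", "charge", "charges", "sections", "evidence", "documents", "witness",
   "witnesses", "verification", "prayer", "io certification", "investigation",
   "complainant", "brief facts", "facts of the case", "gist of the case",
   "synopsis", "conclusion of investigation", "conclusion"]

def looks_like_header_py (line : String) : Bool :=
  let lower := PySem.Chars.strip (PySem.Chars.lower line.toList)
  if lower = [] then false
  else if lower.length > 70 then false
  else STOP_HEADERS.any (fun h =>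
    PySem.Chars.startswith lower h.toList ||
    lower == h.toList ||
    PySem.Chars.startswith lower (h.toList ++ [':']))

-- ===== PORT B =====
def HEADER_SET : PySem.Set (List Char) := PySem.Set.ofList (STOP_HEADERS.map String.toList)

def MAX_HEADER_LEN : Nat := (STOP_HEADERS.map (fun h => h.toList.length)).foldl Nat.max 0

def looks_like_header_py_alt (line : String) : Bool :=
  let lower := PySem.Chars.strip (PySem.Chars.lower line.toList)
  if lower = [] || lower.length > 70 then false
  else (PySem.List.pyRange 1 ((min lower.length MAX_HEADER_LEN : Nat) + 1) 1).any
    (fun i => HEADER_SET.contains (PySem.List.slice lower none (some i)))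

-- ===== PRECONDITION & SPEC =====
def Spec_looks_like_header_py (line : String) (out : Bool) : Prop := out = looks_like_header_py_alt line
instance (line : String) (out : Bool) : Decidable (Spec_looks_like_header_py line out) := by unfold Spec_looks_like_header_py; infer_instance

-- ===== CLAIM (what is proved, stated in full; the proofs are below) =====
def Claim_equal_looks_like_header_py : Prop := ∀ (line : String), Dom_looks_like_header_py line → Spec_looks_like_header_py line (looks_like_header_py line)

-- ===== LEMMAS AND PROOFS =====

-- every header is nonempty and at most MAX_HEADER_LEN (= 27) characters long
theorem header_len_facts : ∀ h ∈ STOP_HEADERS, 1 ≤ h.toList.length ∧ h.toList.length ≤ MAX_HEADER_LEN := by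
  decide

-- A's three tests for one header collapse to "h is a prefix"
theorem disj_iff_prefix (L : List Char) (h : List Char) :
    (PySem.Chars.startswith L h || L == h || PySem.Chars.startswith L (h ++ [':'])) = true ↔ h <+: L := by
  simp only [Bool.or_eq_true, PySem.Chars.startswith_iff, beq_iff_eq]
  constructor
  · rintro ((hp | rfl) | hp)
    · exact hp
    · exact List.prefix_refl _
    · exact (List.prefix_append h [':']).trans hp
  · intro hp; exact Or.inl (Or.inl hp)

-- core equivalence of the two scans
theorem any_eq (L : List Char) :
    STOP_HEADERS.any (fun h =>
      PySem.Chars.startswith L h.toList || L == h.toList ||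
      PySem.Chars.startswith L (h.toList ++ [':'])) =
    (PySem.List.pyRange 1 ((min L.length MAX_HEADER_LEN : Nat) + 1) 1).any
      (fun i => HEADER_SET.contains (PySem.List.slice L none (some i))) := by
  rw [Bool.eq_iff_iff]
  simp only [List.any_eq_true]
  constructor
  · rintro ⟨h, hmem, hdisj⟩
    have hp : h.toList <+: L := (disj_iff_prefix L h.toList).mp hdisj
    obtain ⟨h1, h27⟩ := header_len_facts h hmem
    refine ⟨(h.toList.length : Int), ?_, ?_⟩
    · rw [PySem.List.mem_pyRange_one]
      have := hp.length_le
      refine ⟨by exact_mod_cast h1, by push_cast; omega⟩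
    · rw [PySem.List.slice_to]
      case hb => positivity
      have htake : L.take h.toList.length = h.toList := (List.prefix_iff_eq_take.mp hp).symm
      simp only [Int.toNat_natCast, htake]
      have : h.toList ∈ HEADER_SET := by
        rw [HEADER_SET, PySem.Set.mem_ofList]
        exact List.mem_map_of_mem hmem
      simpa using this
  · rintro ⟨i, hi, hc⟩
    rw [PySem.List.mem_pyRange_one] at hi
    rw [PySem.List.slice_to] at hc
    case hb => omega
    have hmemS : L.take i.toNat ∈ HEADER_SET := by simpa using hc
    rw [HEADER_SET, PySem.Set.mem_ofList, List.mem_map] at hmemS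
    obtain ⟨h, hmem, hEq⟩ := hmemS
    exact ⟨h, hmem, (disj_iff_prefix L h.toList).mpr (hEq ▸ List.take_prefix _ _)⟩

-- ===== VERDICT (by name: the statement is the Claim_ definition above) =====
theorem looks_like_header_py_spec : Claim_equal_looks_like_header_py := by
  intro line _
  unfold Spec_looks_like_header_py looks_like_header_py looks_like_header_py_alt
  set L := PySem.Chars.strip (PySem.Chars.lower line.toList)
  by_cases hnil : L = []
  · simp [hnil]
  · by_cases hlen : L.length > 70
    · simp [hnil, hlen]
    · rw [if_neg hnil, if_neg hlen, if_neg (by simp [hnil, hlen])]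
      exact any_eq L
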